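-- pv_equiv track=rewrite | github.com/6000j/Ao3WordTools | ChapterWords.py | chWCFormatting
-- ===== SOURCE A (Python) =====
-- def chWCFormatting(chapterCounts):
--     total = 0
--     oup = ""
--     for k in range(len(chapterCounts)):
--         currCount = chapterCounts[k]
--         total = total + currCount
--         oup = oup + "\nChapter " + str(k) + " has " + str(currCount) + " words. So far there have been a total of " + str(total) + " words."
--     return oup
-- ===== SOURCE B (Python) =====
-- def chWCFormatting(chapterCounts):
--     totals = []
--     t = 0
--     for c in chapterCounts:
--         t += c
--         totals.append(t)
--     return "".join(
--         "\nChapter " + str(k) + " has " + str(c) + " words. So far there have been a total of " + str(tot) + " words."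
--         for k, (c, tot) in enumerate(zip(chapterCounts, totals)))
-- ===== Notes on version B (the rewrite author's own statement) =====
-- stated objective: faster
-- what changed: B replaces A's single loop that threads a running total and grows the output string by repeated concatenation with a table-first decomposition: it first builds the full prefix-sum table of totals, then formats each line in a comprehension over enumerate(zip(...)) and combines them with ''.join.
import Mathlib
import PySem

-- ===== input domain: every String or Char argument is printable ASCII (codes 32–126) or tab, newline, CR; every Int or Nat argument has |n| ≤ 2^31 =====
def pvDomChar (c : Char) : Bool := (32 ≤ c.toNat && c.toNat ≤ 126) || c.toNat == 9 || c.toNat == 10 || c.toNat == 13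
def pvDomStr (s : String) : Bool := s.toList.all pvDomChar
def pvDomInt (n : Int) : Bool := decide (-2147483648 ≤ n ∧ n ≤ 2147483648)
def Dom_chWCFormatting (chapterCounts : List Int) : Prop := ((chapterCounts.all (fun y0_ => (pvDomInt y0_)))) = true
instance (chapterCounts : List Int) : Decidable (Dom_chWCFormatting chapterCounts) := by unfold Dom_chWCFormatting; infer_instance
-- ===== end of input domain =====

-- ===== PORT A =====
def chWCFormatting (chapterCounts : List Int) : String :=
  ((PySem.List.pyRange 0 (PySem.List.len chapterCounts) 1).foldl
    (fun (st : Int × String) k =>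
      let currCount := PySem.List.pyGetD chapterCounts k 0
      let total := st.1 + currCount
      (total, st.2 ++ "\nChapter " ++ PySem.Int.toStr k ++ " has " ++ PySem.Int.toStr currCount
        ++ " words. So far there have been a total of " ++ PySem.Int.toStr total ++ " words."))
    (0, "")).2

-- ===== PORT B =====
-- B: prefix-sum table first, then a separate formatting pass combined with "".join — same return value, avoids A's repeated string concatenation.
def pvPrefixSums (t : Int) : List Int → List Int
  | [] => []
  | c :: rest => (t + c) :: pvPrefixSums (t + c) rest

def chWCFormatting_alt (chapterCounts : List Int) : String :=
  PySem.Str.join ""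
    ((PySem.List.enumerate (chapterCounts.zip (pvPrefixSums 0 chapterCounts))).map
      (fun p => "\nChapter " ++ PySem.Int.toStr p.1 ++ " has " ++ PySem.Int.toStr p.2.1
        ++ " words. So far there have been a total of " ++ PySem.Int.toStr p.2.2 ++ " words."))

-- ===== PRECONDITION & SPEC =====
def Spec_chWCFormatting (chapterCounts : List Int) (out : String) : Prop := out = chWCFormatting_alt chapterCounts
instance (chapterCounts : List Int) (out : String) : Decidable (Spec_chWCFormatting chapterCounts out) := by unfold Spec_chWCFormatting; infer_instance

-- ===== CLAIM (what is proved, stated in full; the proofs are below) =====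
def Claim_equal_chWCFormatting : Prop := ∀ (chapterCounts : List Int), Dom_chWCFormatting chapterCounts → Spec_chWCFormatting chapterCounts (chWCFormatting chapterCounts)

-- ===== LEMMAS AND PROOFS =====

def pvLine (k c t : Int) : String :=
  "\nChapter " ++ PySem.Int.toStr k ++ " has " ++ PySem.Int.toStr c
    ++ " words. So far there have been a total of " ++ PySem.Int.toStr t ++ " words."

theorem pvJoinEmptyCons (x : String) (xs : List String) :
    PySem.Str.join "" (x :: xs) = x ++ PySem.Str.join "" xs := by
  apply String.ext
  cases xs with
  | nil => simp [PySem.Str.join, PySem.Chars.join, List.intercalate]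
  | cons y ys => simp [PySem.Str.join, PySem.Chars.join, List.intercalate]

theorem pvMain (cs : List Int) : ∀ (a t : Int) (s : String),
    ((PySem.List.enumerate cs a).foldl
      (fun (st : Int × String) (p : Int × Int) =>
        (st.1 + p.2, st.2 ++ pvLine p.1 p.2 (st.1 + p.2))) (t, s)).2
    = s ++ PySem.Str.join ""
        ((PySem.List.enumerate (cs.zip (pvPrefixSums t cs)) a).map
          (fun p => pvLine p.1 p.2.1 p.2.2)) := by
  induction cs with
  | nil => intro a t s; simp [PySem.List.enumerate_nil, pvPrefixSums, PySem.Str.join]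
  | cons c rest ih =>
    intro a t s
    rw [PySem.List.enumerate_cons]
    simp only [List.foldl_cons]
    rw [ih (a + 1) (t + c) (s ++ pvLine a c (t + c))]
    show _ = s ++ PySem.Str.join "" ((PySem.List.enumerate ((c, t + c) :: rest.zip (pvPrefixSums (t + c) rest)) a).map _)
    rw [PySem.List.enumerate_cons, List.map_cons, pvJoinEmptyCons, String.append_assoc]

theorem chWCFormatting_eq_enum_fold (cs : List Int) :
    chWCFormatting cs
    = ((PySem.List.enumerate cs 0).foldl
        (fun (st : Int × String) (p : Int × Int) =>
          (st.1 + p.2, st.2 ++ pvLine p.1 p.2 (st.1 + p.2))) (0, "")).2 := by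
  rw [PySem.List.enumerate_eq_map_pyRange (d := 0), List.foldl_map]
  simp only [chWCFormatting, pvLine, String.append_assoc]

-- ===== VERDICT (by name: the statement is the Claim_ definition above) =====
theorem chWCFormatting_spec : Claim_equal_chWCFormatting := by
  intro cs _
  show chWCFormatting cs = chWCFormatting_alt cs
  rw [chWCFormatting_eq_enum_fold, pvMain]
  show "" ++ _ = chWCFormatting_alt cs
  rw [String.empty_append]
  rfl
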